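-- pv_equiv track=rewrite | github.com/nemzutkovic/Carleton-University-CS-Guide | COMP 3007/Assignment 1 (107)/comp3007_w19_101085982_a1_1.py | underscoreIndex
-- ===== SOURCE A (Python) =====
-- def underscoreIndex(string):
-- 	if underscoreExistence(string) == False:
-- 		return -1
-- 	else:
-- 		if string[0] == '_':
-- 			return 0
-- 		else:
-- 			return 1 + underscoreIndex(string[1:])
--
-- def underscoreExistence(string):
-- 	if not string:
-- 		return False
-- 	elif string[0] == '_':
-- 		return True
-- 	else:
-- 		return underscoreExistence(string[1:])
-- ===== SOURCE B (Python) =====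
-- def underscoreIndex(string):
--     for i, c in enumerate(string):
--         if c == '_':
--             return i
--     return -1
-- ===== Notes on version B (the rewrite author's own statement) =====
-- stated objective: faster
-- what changed: Replaced the double recursion (an existence check rescanned on every recursive step, plus an index-accumulating recursion over suffixes) with one explicit single-pass loop over (index, char) pairs returning the index at the first '_'.
import Mathlib
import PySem

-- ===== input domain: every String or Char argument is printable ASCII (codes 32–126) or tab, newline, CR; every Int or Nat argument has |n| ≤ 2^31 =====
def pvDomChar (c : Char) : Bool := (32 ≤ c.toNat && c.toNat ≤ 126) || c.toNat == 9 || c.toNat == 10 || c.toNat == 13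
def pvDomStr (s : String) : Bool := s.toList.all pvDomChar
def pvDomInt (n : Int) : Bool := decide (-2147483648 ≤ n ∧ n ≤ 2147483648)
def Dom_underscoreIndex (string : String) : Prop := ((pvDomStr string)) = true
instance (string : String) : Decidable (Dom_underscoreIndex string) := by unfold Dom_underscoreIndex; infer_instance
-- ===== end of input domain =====

-- B replaces A's quadratic double recursion with one single-pass loop; timed faster by the check if confirmed.
-- ===== PORT A =====
-- helper underscoreExistence, recursion over the character list
def uExist : List Char → Bool
  | [] => false
  | c :: cs => if c = '_' then true else uExist cs

-- A's recursion: existence check first, then head test, else 1 + recurse on the tail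
def uIdx : List Char → Int
  | [] => -1
  | c :: cs => if uExist (c :: cs) = false then -1
               else if c = '_' then 0 else 1 + uIdx cs

def underscoreIndex (string : String) : Int := uIdx string.toList

-- ===== PORT B =====
-- B: one pass with an explicit index counter, return the index at the first '_', -1 after the loop
def altAux : List Char → Int → Int
  | [], _ => -1
  | c :: cs, i => if c = '_' then i else altAux cs (i + 1)

def underscoreIndex_alt (string : String) : Int := altAux string.toList 0

-- ===== PRECONDITION & SPEC =====
def Spec_underscoreIndex (string : String) (out : Int) : Prop := out = underscoreIndex_alt string
instance (string : String) (out : Int) : Decidable (Spec_underscoreIndex string out) := by unfold Spec_underscoreIndex; infer_instance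

-- ===== CLAIM (what is proved, stated in full; the proofs are below) =====
def Claim_equal_underscoreIndex : Prop := ∀ (string : String), Dom_underscoreIndex string → Spec_underscoreIndex string (underscoreIndex string)

-- ===== LEMMAS AND PROOFS =====
theorem altAux_eq (l : List Char) : ∀ i : Int, altAux l i = if uExist l then i + uIdx l else -1 := by
  induction l with
  | nil => intro i; simp [altAux, uExist]
  | cons c cs ih =>
    intro i
    by_cases hc : c = '_'
    · simp [altAux, uExist, uIdx, hc]
    · simp only [altAux, uExist, uIdx, if_neg hc, ih (i + 1)]
      by_cases he : uExist cs
      · simp [he]; ring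
      · simp [he]

-- ===== VERDICT (by name: the statement is the Claim_ definition above) =====
theorem underscoreIndex_spec : Claim_equal_underscoreIndex := by
  intro s _
  unfold Spec_underscoreIndex underscoreIndex underscoreIndex_alt
  rw [altAux_eq]
  cases hl : s.toList with
  | nil => simp [uExist, uIdx]
  | cons c cs =>
    by_cases he : uExist (c :: cs)
    · simp [he, uIdx]
    · simp [he, uIdx]
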